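-- pv_equiv track=rewrite | github.com/satrai-lab/ccduit | Documentation/Experiments/Scallability/Sca.py | adjust_node_types
-- ===== SOURCE A (Python) =====
-- def adjust_node_types(nodes, percentage_types):
--     num_nodes = len(nodes)
--     num_types = round(num_nodes * percentage_types / 100)  # Calculate number of types based on percentage
--     types = [f'type_{i}' for i in range(max(1, num_types))]  # Ensure at least one type
--
--     for i, node in enumerate(nodes):
--         type_index = i % len(types)
--         node['type'] = types[type_index]
--
--     return nodes
-- ===== SOURCE B (Python) =====
-- def adjust_node_types(nodes, percentage_types):
--     num_types = round(len(nodes) * percentage_types / 100)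
--     k = max(1, num_types)  # at least one type, same floor as before
--     for t in range(k):
--         label = f'type_{t}'
--         for node in nodes[t::k]:
--             node['type'] = label
--     return nodes
-- ===== Notes on version B (the rewrite author's own statement) =====
-- stated objective: alternative
-- what changed: Inverts the loop nesting: instead of A's single pass over nodes looking up a precomputed types list via i % len(types), B loops over the type indices and writes each label type_t into the slice nodes[t::k] in one sweep; no label list is materialised.
import Mathlib
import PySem

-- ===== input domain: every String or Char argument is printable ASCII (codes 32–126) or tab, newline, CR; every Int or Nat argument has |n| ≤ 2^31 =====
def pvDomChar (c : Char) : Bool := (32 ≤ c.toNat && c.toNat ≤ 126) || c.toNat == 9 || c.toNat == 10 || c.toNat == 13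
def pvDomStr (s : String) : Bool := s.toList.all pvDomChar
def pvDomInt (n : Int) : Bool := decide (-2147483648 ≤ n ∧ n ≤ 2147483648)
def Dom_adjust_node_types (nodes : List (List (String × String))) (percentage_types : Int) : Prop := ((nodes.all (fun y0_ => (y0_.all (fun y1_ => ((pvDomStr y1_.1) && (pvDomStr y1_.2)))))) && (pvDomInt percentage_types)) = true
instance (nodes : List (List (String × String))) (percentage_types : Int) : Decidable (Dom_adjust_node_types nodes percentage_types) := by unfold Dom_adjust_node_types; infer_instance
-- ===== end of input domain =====

-- B assigns the same cyclic labels with the loop nesting inverted: an outer loop over the type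
-- indices writes each label into the stride nodes[t::k] in one sweep, instead of A's per-node
-- `i % len(types)` lookup into a precomputed label list (objective: alternative; same cost).
-- A mutates the node dicts in place and returns the same list; B performs the same mutation in
-- Python, and the equivalence proved here is about the returned value.

-- node['type'] = v  on a dict held as an insertion-ordered association list
def pvSetType (node : List (String × String)) (v : String) : List (String × String) :=
  (PySem.Dict.insert (PySem.Dict.mk node) "type" v).items

-- integer port of Python's round(x / 100): half-to-even. For int x the float quotient x/100 is an
-- exact half-integer exactly when x ≡ 50 (mod 100), so this integer formula is what round returns
-- (exact for every |x| small enough that building A's `types` list terminates at all).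
def pvRoundDiv100 (x : Int) : Int :=
  let q := PySem.Int.floordiv x 100
  let r := PySem.Int.mod x 100
  if 2 * r < 100 then q
  else if 100 < 2 * r then q + 1
  else if PySem.Int.mod q 2 = 0 then q else q + 1

-- ===== PORT A =====
-- for i, node in enumerate(nodes): node['type'] = types[i % len(types)]
def pvAssignLoopA (types : List String) : List (List (String × String)) → Int → List (List (String × String))
  | [], _ => []
  | node :: rest, i =>
      pvSetType node (PySem.List.pyGetD types (PySem.Int.mod i (types.length : Int)) "")
        :: pvAssignLoopA types rest (i + 1)

def adjust_node_types (nodes : List (List (String × String))) (percentage_types : Int) : List (List (String × String)) :=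
  let num_nodes : Int := nodes.length
  let num_types := pvRoundDiv100 (num_nodes * percentage_types)
  let types := (PySem.List.pyRange 0 (max 1 num_types) 1).map (fun i => "type_" ++ PySem.Int.toStr i)
  pvAssignLoopA types nodes 0

-- ===== PORT B =====
-- for node in nodes[t::k]: node['type'] = label   (walk the list with a countdown to the next slice hit)
def pvAssignStride (lab : String) (k : Nat) : List (List (String × String)) → Nat → List (List (String × String))
  | [], _ => []
  | node :: rest, 0 => pvSetType node lab :: pvAssignStride lab k rest (k - 1)
  | node :: rest, c + 1 => node :: pvAssignStride lab k rest c

def adjust_node_types_alt (nodes : List (List (String × String))) (percentage_types : Int) : List (List (String × String)) :=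
  let k := max 1 (pvRoundDiv100 ((nodes.length : Int) * percentage_types))
  (PySem.List.pyRange 0 k 1).foldl
    (fun acc t => pvAssignStride ("type_" ++ PySem.Int.toStr t) k.toNat acc t.toNat) nodes

-- ===== PRECONDITION & SPEC =====
def Spec_adjust_node_types (nodes : List (List (String × String))) (percentage_types : Int) (out : List (List (String × String))) : Prop := out = adjust_node_types_alt nodes percentage_types
instance (nodes : List (List (String × String))) (percentage_types : Int) (out : List (List (String × String))) : Decidable (Spec_adjust_node_types nodes percentage_types out) := by unfold Spec_adjust_node_types; infer_instance

-- ===== CLAIM (what is proved, stated in full; the proofs are below) =====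
def Claim_equal_adjust_node_types : Prop := ∀ (nodes : List (List (String × String))) (percentage_types : Int), Dom_adjust_node_types nodes percentage_types → Spec_adjust_node_types nodes percentage_types (adjust_node_types nodes percentage_types)

-- ===== LEMMAS AND PROOFS =====

-- residue bookkeeping for the stride walk: after one cons the countdown's target residue
-- shifts from 0 to K-1 …
theorem pv_cond_shift (K j : Nat) (hK : 0 < K) :
    (K - 1 <= j ∧ (j - (K - 1)) % K = 0) ↔ (j + 1) % K = 0 := by
  rw [← Nat.dvd_iff_mod_eq_zero, ← Nat.dvd_iff_mod_eq_zero]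
  constructor
  · rintro ⟨h1, m, hm⟩
    refine ⟨m + 1, ?_⟩
    rw [Nat.mul_add, Nat.mul_one]
    generalize hKm : K * m = a at hm ⊢
    omega
  · rintro ⟨m, hm⟩
    match m with
    | 0 => simp at hm
    | m' + 1 =>
      rw [Nat.mul_add, Nat.mul_one] at hm
      refine ⟨?_, m', ?_⟩ <;>
        · generalize hKm : K * m' = a at hm ⊢
          omega

-- … and a countdown that starts at t < K hits exactly the positions with residue t
theorem pv_cond_residue (K t j : Nat) (_hK : 0 < K) (ht : t < K) :
    (t <= j ∧ (j - t) % K = 0) ↔ j % K = t := by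
  constructor
  · rintro ⟨h1, h2⟩
    obtain ⟨m, hm⟩ := Nat.dvd_iff_mod_eq_zero.mpr h2
    have hj : j = t + K * m := by
      generalize hKm : K * m = a at hm ⊢
      omega
    rw [Nat.mul_comm] at hj
    rw [hj, Nat.add_mul_mod_self_right]
    exact Nat.mod_eq_of_lt ht
  · intro h
    have hle := Nat.mod_le j K
    refine ⟨by omega, Nat.dvd_iff_mod_eq_zero.mp ⟨j / K, ?_⟩⟩
    have hdm := Nat.div_add_mod j K
    rw [h] at hdm
    generalize hKm : K * (j / K) = a at hdm ⊢
    omega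

-- one stride pass, element by element
theorem pvAssignStride_getElem? (lab : String) (K : Nat) (hK : 0 < K) :
    ∀ (xs : List (List (String × String))) (c j : Nat),
      (pvAssignStride lab K xs c)[j]? =
        xs[j]?.map (fun x => if c <= j ∧ (j - c) % K = 0 then pvSetType x lab else x) := by
  intro xs
  induction xs with
  | nil => intro c j; simp [pvAssignStride]
  | cons x xs ih =>
    intro c j
    cases c with
    | zero =>
      cases j with
      | zero => simp [pvAssignStride]
      | succ j' =>
        simp only [pvAssignStride, List.getElem?_cons_succ, ih (K - 1) j']
        cases h : xs[j']? with
        | none => rfl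
        | some y =>
          simp only [Option.map_some, Option.some.injEq]
          by_cases hc : (j' + 1) % K = 0
          · rw [if_pos ((pv_cond_shift K j' hK).mpr hc),
                if_pos (show 0 <= j' + 1 ∧ (j' + 1 - 0) % K = 0 from ⟨Nat.zero_le _, by simpa using hc⟩)]
          · rw [if_neg (show ¬(K - 1 <= j' ∧ (j' - (K - 1)) % K = 0) from
                  fun hh => hc ((pv_cond_shift K j' hK).mp hh)),
                if_neg (show ¬(0 <= j' + 1 ∧ (j' + 1 - 0) % K = 0) from
                  fun hh => hc (by simpa using hh.2))]
    | succ c' =>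
      cases j with
      | zero => simp [pvAssignStride]
      | succ j' =>
        simp only [pvAssignStride, List.getElem?_cons_succ, ih c' j']
        cases h : xs[j']? with
        | none => rfl
        | some y =>
          simp only [Option.map_some, Option.some.injEq]
          by_cases hc : c' <= j' ∧ (j' - c') % K = 0
          · rw [if_pos hc,
                if_pos (show c' + 1 <= j' + 1 ∧ (j' + 1 - (c' + 1)) % K = 0 from
                  ⟨by omega, by simpa [Nat.succ_sub_succ] using hc.2⟩)]
          · rw [if_neg hc,
                if_neg (show ¬(c' + 1 <= j' + 1 ∧ (j' + 1 - (c' + 1)) % K = 0) from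
                  fun hh => hc ⟨by omega, by simpa [Nat.succ_sub_succ] using hh.2⟩)]

-- A's loop, element by element
theorem pvAssignLoopA_getElem? (types : List String) :
    ∀ (xs : List (List (String × String))) (i j : Nat),
      (pvAssignLoopA types xs (i : Int))[j]? =
        xs[j]?.map (fun x =>
          pvSetType x (PySem.List.pyGetD types (PySem.Int.mod ((i + j : Nat) : Int) (types.length : Int)) "")) := by
  intro xs
  induction xs with
  | nil => intro i j; simp [pvAssignLoopA]
  | cons x xs ih =>
    intro i j
    cases j with
    | zero => simp [pvAssignLoopA]
    | succ j' =>
      have hcast : ((i : Int) + 1) = ((i + 1 : Nat) : Int) := by push_cast; ring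
      simp only [pvAssignLoopA, List.getElem?_cons_succ, hcast, ih (i + 1) j']
      have harith : i + 1 + j' = i + (j' + 1) := by omega
      rw [harith]

-- the label A reads from the `types` list at residue r is the literal label B writes for t = r
theorem pv_labelA (b : Int) (r : Nat) (hr : r < b.toNat) :
    PySem.List.pyGetD
      ((PySem.List.pyRange 0 b 1).map (fun i => "type_" ++ PySem.Int.toStr i))
      ((r : Nat) : Int) "" = "type_" ++ PySem.Int.toStr (r : Int) := by
  rw [PySem.List.pyGetD_natCast]
  have hlen : (PySem.List.pyRange 0 b 1).length = b.toNat := by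
    rw [PySem.List.length_pyRange_one]; simp
  have hrl : r < ((PySem.List.pyRange 0 b 1).map (fun i => "type_" ++ PySem.Int.toStr i)).length := by
    simpa [hlen] using hr
  rw [List.getD_eq_getElem _ _ hrl, List.getElem_map]
  have hget := PySem.List.getElem_pyRange_one 0 b r (by simpa [hlen] using hr)
  rw [hget, zero_add]

-- B's fold over the first T type indices, element by element
theorem pv_fold_getElem? (K : Nat) (hK : 0 < K) (nodes : List (List (String × String))) :
    ∀ (T : Nat), T <= K → ∀ (j : Nat),
      ((PySem.List.pyRange 0 (T : Int) 1).foldl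
          (fun acc t => pvAssignStride ("type_" ++ PySem.Int.toStr t) K acc t.toNat) nodes)[j]? =
        nodes[j]?.map (fun x =>
          if j % K < T then pvSetType x ("type_" ++ PySem.Int.toStr ((j % K : Nat) : Int)) else x) := by
  intro T
  induction T with
  | zero =>
    intro _ j
    rw [PySem.List.pyRange_one_eq_nil (by norm_num)]
    simp
  | succ T' ih =>
    intro hT j
    have hT' : T' < K := hT
    have hsplit : PySem.List.pyRange 0 ((T' + 1 : Nat) : Int) 1
        = PySem.List.pyRange 0 (T' : Int) 1 ++ [(T' : Int)] := by
      push_cast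
      exact PySem.List.pyRange_one_succ_right (by omega)
    rw [hsplit, List.foldl_append, List.foldl_cons, List.foldl_nil,
        pvAssignStride_getElem? _ K hK, ih (le_of_lt hT') j]
    have htn : ((T' : Int)).toNat = T' := by simp
    rw [htn]
    cases h : nodes[j]? with
    | none => rfl
    | some y =>
      simp only [Option.map_some, Option.some.injEq]
      by_cases hres : j % K = T'
      · rw [if_pos ((pv_cond_residue K T' j hK hT').mpr hres),
            if_neg (show ¬ j % K < T' by omega),
            if_pos (show j % K < T' + 1 by omega), hres]
      · rw [if_neg (show ¬(T' <= j ∧ (j - T') % K = 0) from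
              fun hh => hres ((pv_cond_residue K T' j hK hT').mp hh))]
        by_cases hlt : j % K < T'
        · rw [if_pos hlt, if_pos (show j % K < T' + 1 by omega)]
        · rw [if_neg hlt, if_neg (show ¬ j % K < T' + 1 by omega)]

-- ===== VERDICT (by name: the statement is the Claim_ definition above) =====
theorem adjust_node_types_spec : Claim_equal_adjust_node_types := by
  intro nodes percentage_types _
  unfold Spec_adjust_node_types
  have e1 : adjust_node_types nodes percentage_types
      = pvAssignLoopA
          ((PySem.List.pyRange 0 (max 1 (pvRoundDiv100 ((nodes.length : Int) * percentage_types))) 1).map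
            (fun i => "type_" ++ PySem.Int.toStr i)) nodes 0 := rfl
  have e2 : adjust_node_types_alt nodes percentage_types
      = (PySem.List.pyRange 0 (max 1 (pvRoundDiv100 ((nodes.length : Int) * percentage_types))) 1).foldl
          (fun acc t => pvAssignStride ("type_" ++ PySem.Int.toStr t)
            (max 1 (pvRoundDiv100 ((nodes.length : Int) * percentage_types))).toNat acc t.toNat) nodes := rfl
  rw [e1, e2]
  set k : Int := max 1 (pvRoundDiv100 ((nodes.length : Int) * percentage_types)) with hk
  have hk1 : (1 : Int) <= k := le_max_left _ _
  set K : Nat := k.toNat with hKdef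
  have hK : 0 < K := by omega
  have hkK : k = (K : Int) := by omega
  have hlenT : ((PySem.List.pyRange 0 k 1).map (fun i => "type_" ++ PySem.Int.toStr i)).length = K := by
    rw [List.length_map, PySem.List.length_pyRange_one]; omega
  apply List.ext_getElem?
  intro j
  have hA := pvAssignLoopA_getElem?
      ((PySem.List.pyRange 0 k 1).map (fun i => "type_" ++ PySem.Int.toStr i)) nodes 0 j
  simp only [Nat.cast_zero] at hA
  rw [hA]
  simp only [Nat.zero_add]
  have hB := pv_fold_getElem? K hK nodes K (le_refl K) j
  rw [← hkK] at hB
  rw [hB]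
  cases h : nodes[j]? with
  | none => rfl
  | some y =>
    simp only [Option.map_some, Option.some.injEq]
    have hmodlt : j % K < K := Nat.mod_lt _ hK
    rw [if_pos hmodlt]
    have hmn : PySem.Int.mod ((j : Nat) : Int)
        ((((PySem.List.pyRange 0 k 1).map (fun i => "type_" ++ PySem.Int.toStr i)).length : Int))
        = ((j % K : Nat) : Int) := by
      rw [hlenT]; exact PySem.Int.mod_natCast _ _
    rw [hmn, pv_labelA k (j % K) (by rw [← hKdef]; exact hmodlt)]
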